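-- pv_equiv track=rewrite | github.com/DonghakPark/TIL | Study_Algorithm/A_4.py | solution
-- ===== SOURCE A (Python) =====
-- def solution(board):
--     dx = [0, 0, 1, -1]
--     dy = [1, -1, 0, 0]
--
--     Q = []
--
--     visit = [[False] * 5 for i in range(5)]
--     dist = [[0] * 5 for i in range(5)]
--
--     Q.append((0, 0))
--     current_Alph = board[0][0]
--     visit[0][0] = True
--     dist[0][0] = 1
--     revisit = False
--
--     while Q:
--         x, y = Q.pop(0)
--         current_Alph = board[x][y]
--         for k in range(4):
--             nx, ny = x + dx[k], y + dy[k]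
--
--             if 0 <= nx < 5 and 0 <= ny < 5:
--                 if visit[nx][ny] == False and board[nx][ny] > current_Alph:
--                     Q.append((nx, ny))
--                     dist[nx][ny] = dist[x][y] + 1
--                     visit[nx][ny] = True
--
--     answer = 0
--
--     for element in dist:
--         for j in element:
--             if j > answer:
--                 answer = j
--
--     return answer
-- ===== SOURCE B (Python) =====
-- def solution(board):
--     # Level-synchronous frontier expansion: count BFS levels instead of
--     # keeping dist/visit matrices and scanning for the maximum at the end.
--     visited = {(0, 0)}
--     frontier = [(0, 0)]
--     depth = 0
--     while frontier:
--         depth += 1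
--         nxt = []
--         for x, y in frontier:
--             for nx, ny in ((x, y + 1), (x, y - 1), (x + 1, y), (x - 1, y)):
--                 if 0 <= nx < 5 and 0 <= ny < 5 and (nx, ny) not in visited \
--                         and board[nx][ny] > board[x][y]:
--                     visited.add((nx, ny))
--                     nxt.append((nx, ny))
--         frontier = nxt
--     return depth
-- ===== Notes on version B (the rewrite author's own statement) =====
-- stated objective: simpler
-- what changed: Replaces the queue BFS with 5x5 visit/dist matrices and a final max-scan by a level-synchronous frontier expansion over a visited set that just counts levels (the maximum BFS distance is the number of levels).
import Mathlib
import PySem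

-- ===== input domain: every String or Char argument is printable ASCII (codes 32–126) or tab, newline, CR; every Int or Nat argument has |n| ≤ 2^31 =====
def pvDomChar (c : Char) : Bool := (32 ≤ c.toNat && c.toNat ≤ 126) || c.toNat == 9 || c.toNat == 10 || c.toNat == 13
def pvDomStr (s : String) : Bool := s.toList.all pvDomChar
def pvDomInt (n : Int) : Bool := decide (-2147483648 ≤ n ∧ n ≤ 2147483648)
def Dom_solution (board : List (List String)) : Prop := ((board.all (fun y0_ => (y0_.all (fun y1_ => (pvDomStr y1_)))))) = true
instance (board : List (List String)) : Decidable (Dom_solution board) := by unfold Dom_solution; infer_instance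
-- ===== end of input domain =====

-- B replaces A's queue BFS (visit/dist matrices + final max scan) by a level-synchronous
-- frontier expansion that just counts levels; same return value, no speed claim.

-- ===== PORT A =====
-- board[i][j]; exact for the in-range reads performed on boards satisfying Pre_solution
def boardAt (board : List (List String)) (x y : Int) : String :=
  PySem.List.pyGetD (PySem.List.pyGetD board x []) y ""

-- m[x][y] with a default; all reads A performs are guarded in range (default never hit on 5×5 state)
def mgetD {α : Type} (m : List (List α)) (x y : Int) (d : α) : α :=
  PySem.List.pyGetD (PySem.List.pyGetD m x []) y d

-- m[x][y] = v; exact for the guarded in-range writes (0 ≤ x < 5, 0 ≤ y < 5) A and B perform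
def mset {α : Type} (m : List (List α)) (x y : Int) (v : α) : List (List α) :=
  PySem.List.pySetD m x (PySem.List.pySetD (PySem.List.pyGetD m x []) y v)

def dxA : List Int := [0, 0, 1, -1]
def dyA : List Int := [1, -1, 0, 0]

-- body of A's inner 'for k in range(4)' loop
def stepA (board : List (List String)) (x y : Int)
    (st : List (Int × Int) × List (List Bool) × List (List Int)) (k : Int) :
    List (Int × Int) × List (List Bool) × List (List Int) :=
  let nx := x + PySem.List.pyGetD dxA k 0
  let ny := y + PySem.List.pyGetD dyA k 0
  if 0 ≤ nx ∧ nx < 5 ∧ 0 ≤ ny ∧ ny < 5 then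
    if mgetD st.2.1 nx ny true = false ∧ boardAt board x y < boardAt board nx ny then
      (st.1 ++ [(nx, ny)], mset st.2.1 nx ny true, mset st.2.2 nx ny (mgetD st.2.2 x y 0 + 1))
    else st
  else st

-- A's 'while Q' loop; fuel 26 always suffices (at most 25 cells are ever enqueued)
def AloopF (board : List (List String)) :
    Nat → List (Int × Int) → List (List Bool) → List (List Int) → List (List Int)
  | 0, _, _, dist => dist
  | f + 1, Q, visit, dist =>
    match Q with
    | [] => dist
    | (x, y) :: rest =>
      let st := (PySem.List.pyRange 0 4 1).foldl (stepA board x y) (rest, visit, dist)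
      AloopF board f st.1 st.2.1 st.2.2

-- A's final 'for element in dist: for j in element: if j > answer: answer = j'
def maxScan (dist : List (List Int)) : Int :=
  dist.foldl (fun a row => row.foldl (fun a j => if a < j then j else a) a) 0

def solution (board : List (List String)) : Int :=
  let visit := mset (List.replicate 5 (List.replicate 5 false)) 0 0 true
  let dist := mset (List.replicate 5 (List.replicate 5 (0 : Int))) 0 0 1
  maxScan (AloopF board 26 [((0 : Int), (0 : Int))] visit dist)

-- ===== PORT B =====
def candList (x y : Int) : List (Int × Int) := [(x, y + 1), (x, y - 1), (x + 1, y), (x - 1, y)]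

-- B's guard: in range, not yet visited, strictly larger letter
def goodB (board : List (List String)) (V : List (Int × Int)) (x y : Int) (c : Int × Int) : Bool :=
  decide (0 ≤ c.1 ∧ c.1 < 5 ∧ 0 ≤ c.2 ∧ c.2 < 5) && !(V.contains c) &&
    decide (boardAt board x y < boardAt board c.1 c.2)

-- body of B's inner loop over the four neighbour candidates
def stepB (board : List (List String)) (x y : Int)
    (st : List (Int × Int) × List (Int × Int)) (c : Int × Int) :
    List (Int × Int) × List (Int × Int) :=
  if goodB board st.1 x y c then (PySem.Set.add st.1 c, st.2 ++ [c]) else st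

-- one whole level: expand every frontier cell, collecting the next frontier
def levelB (board : List (List String)) (vis : List (Int × Int)) (frontier : List (Int × Int)) :
    List (Int × Int) × List (Int × Int) :=
  frontier.foldl (fun st p => (candList p.1 p.2).foldl (stepB board p.1 p.2) st) (vis, [])

-- B's 'while frontier' loop; fuel 26 always suffices (at most 25 non-empty levels)
def BloopF (board : List (List String)) :
    Nat → List (Int × Int) → List (Int × Int) → Int → Int
  | 0, _, _, depth => depth
  | f + 1, vis, frontier, depth =>
    match frontier with
    | [] => depth
    | _ :: _ =>
      let st := levelB board vis frontier
      BloopF board f st.1 st.2 (depth + 1)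

def solution_alt (board : List (List String)) : Int :=
  BloopF board 26 (PySem.Set.ofList [((0 : Int), (0 : Int))]) [((0 : Int), (0 : Int))] 0

-- ===== PRECONDITION & SPEC =====
-- the 25 cells of the 5×5 grid
def gridL : List (Int × Int) :=
  [(0,0),(0,1),(0,2),(0,3),(0,4),(1,0),(1,1),(1,2),(1,3),(1,4),
   (2,0),(2,1),(2,2),(2,3),(2,4),(3,0),(3,1),(3,2),(3,3),(3,4),
   (4,0),(4,1),(4,2),(4,3),(4,4)]

-- is the window cell c present on the (possibly ragged) board?
def presP (board : List (List String)) (c : Int × Int) : Bool :=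
  decide (0 ≤ c.1) && decide (c.1.toNat < board.length) &&
    decide (0 ≤ c.2) && decide (c.2.toNat < (board.getD c.1.toNat []).length)

def cellP (board : List (List String)) (c : Int × Int) : String :=
  (board.getD c.1.toNat []).getD c.2.toNat ""

-- code-point lexicographic 'less than' on strings (what Python's '<' computes), kernel-reducible
def ltCh : List Char → List Char → Bool
  | [], [] => false
  | [], _ :: _ => true
  | _ :: _, [] => false
  | a :: as, b :: bs => if a = b then ltCh as bs else decide (a.toNat < b.toNat)

def ltStr (s t : String) : Bool := ltCh s.toList t.toList

def winNbrs (c : Int × Int) : List (Int × Int) :=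
  [(c.1, c.2 + 1), (c.1, c.2 - 1), (c.1 + 1, c.2), (c.1 - 1, c.2)]

-- one monotone growth step of the increasing-step reachability region inside the 5×5 window
def growR (board : List (List String)) (S : List (Int × Int)) : List (Int × Int) :=
  gridL.filter (fun c => S.contains c ||
    (presP board c && (winNbrs c).any (fun p => S.contains p && ltStr (cellP board p) (cellP board c))))

-- the closure (24 growth steps saturate the 25-cell window): exactly the cells A's BFS pops
def reachR (board : List (List String)) : List (Int × Int) :=
  (growR board)^[24] [((0 : Int), (0 : Int))]

-- Pre_ is exactly A's return domain: (0,0) is present, and every window cell in the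
-- increasing-step reachability closure (a bounded property of the board over the fixed 25-cell
-- window, not a run of either port) has all of its in-window neighbours present; on any other
-- board A (and B) index a missing cell and raise IndexError.
def Pre_solution (board : List (List String)) : Prop :=
  presP board (0, 0) = true ∧
  ∀ c ∈ reachR board, ∀ p ∈ winNbrs c,
    (0 ≤ p.1 ∧ p.1 < 5 ∧ 0 ≤ p.2 ∧ p.2 < 5) → presP board p = true
instance (board : List (List String)) : Decidable (Pre_solution board) := by
  unfold Pre_solution; infer_instance

def pvWitness_solution : List (List String) :=
  [["a", "a", "a", "a", "a"], ["a", "a", "a", "a", "a"], ["a", "a", "a", "a", "a"],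
   ["a", "a", "a", "a", "a"], ["a", "a", "a", "a", "a"]]

def Spec_solution (board : List (List String)) (out : Int) : Prop := out = solution_alt board
instance (board : List (List String)) (out : Int) : Decidable (Spec_solution board out) := by
  unfold Spec_solution; infer_instance

-- ===== CLAIM (what is proved, stated in full; the proofs are below) =====
def Claim_equal_solution : Prop := ∀ (board : List (List String)), Dom_solution board → Pre_solution board → Spec_solution board (solution board)

-- ===== LEMMAS AND PROOFS =====

def shape5 {α : Type} (m : List (List α)) : Prop := m.length = 5 ∧ ∀ r ∈ m, r.length = 5

-- number of grid cells not yet in the visited set V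
def setFc (V : List (Int × Int)) : Nat := gridL.countP (fun c => !(V.contains c))

-- the cells a pop of (x, y) discovers, scanning candidates cs against a growing visited set
def disc (board : List (List String)) (V : List (Int × Int)) (x y : Int) :
    List (Int × Int) → List (Int × Int)
  | [] => []
  | c :: cs =>
    if goodB board V x y c then c :: disc board (V ++ [c]) x y cs else disc board V x y cs

def discover (board : List (List String)) (V : List (Int × Int)) (x y : Int) : List (Int × Int) :=
  disc board V x y (candList x y)

-- the common abstraction: mid-level BFS state (visited V, rest of current level l1 at depth d,
-- next level collected so far l2), fuelled
def absF (board : List (List String)) :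
    Nat → List (Int × Int) → List (Int × Int) → List (Int × Int) → Int → Int
  | 0, _, _, _, dd => dd
  | _ + 1, _, [], [], dd => dd
  | f + 1, V, [], c :: l2, dd => absF board (f + 1) V (c :: l2) [] (dd + 1)
  | f + 1, V, (x, y) :: l1, l2, dd =>
    absF board f (V ++ discover board V x y) l1 (l2 ++ discover board V x y) dd
  termination_by f _ _ l2 _ => (f, l2.length)

def absRun (board : List (List String)) (V l1 l2 : List (Int × Int)) (dd : Int) : Int :=
  absF board (l1.length + l2.length + setFc V) V l1 l2 dd

theorem mem_gridL (a b : Int) : (a, b) ∈ gridL ↔ 0 ≤ a ∧ a < 5 ∧ 0 ≤ b ∧ b < 5 := by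
  constructor
  · intro h; fin_cases h <;> norm_num
  · rintro ⟨h1, h2, h3, h4⟩
    interval_cases a <;> interval_cases b <;> simp [gridL]


theorem contains_iff_memP {V : List (Int × Int)} {c : Int × Int} : V.contains c = true ↔ c ∈ V := by
  simp

theorem goodB_spec {board : List (List String)} {V : List (Int × Int)} {x y : Int} {c : Int × Int}
    (h : goodB board V x y c = true) : c ∈ gridL ∧ V.contains c = false := by
  unfold goodB at h
  simp only [Bool.and_eq_true, Bool.not_eq_true', decide_eq_true_eq] at h
  obtain ⟨⟨hb, hcv⟩, -⟩ := h
  refine ⟨?_, hcv⟩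
  have := (mem_gridL c.1 c.2).mpr hb
  simpa using this

theorem goodB_notmem {board : List (List String)} {V : List (Int × Int)} {x y : Int} {c : Int × Int}
    (h : goodB board V x y c = true) : c ∉ V := by
  have := (goodB_spec h).2
  intro hc
  rw [contains_iff_memP.mpr hc] at this
  cases this

theorem countP_notmem_append {L V : List (Int × Int)} {c : Int × Int}
    (hnd : L.Nodup) (hc : c ∈ L) (hcV : c ∉ V) :
    L.countP (fun a => !((V ++ [c]).contains a)) + 1 = L.countP (fun a => !(V.contains a)) := by
  induction L with
  | nil => cases hc
  | cons h t ih =>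
    rw [List.countP_cons, List.countP_cons]
    rcases List.mem_cons.mp hc with rfl | hct
    · have hcnt : c ∉ t := (List.nodup_cons.mp hnd).1
      have hcong : t.countP (fun a => !((V ++ [c]).contains a)) = t.countP (fun a => !(V.contains a)) := by
        apply List.countP_congr
        intro a ha
        have hac : a ≠ c := fun h => hcnt (h ▸ ha)
        by_cases hav : a ∈ V <;> simp [hav, hac]
      rw [hcong]
      simp [hcV]
    · have hhc : h ≠ c := by
        rintro rfl
        exact (List.nodup_cons.mp hnd).1 hct
      have hhead : (!((V ++ [c]).contains h)) = (!(V.contains h)) := by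
        by_cases hhv : h ∈ V <;> simp [hhv, hhc]
      rw [hhead]
      have := ih (List.nodup_cons.mp hnd).2 hct
      omega

theorem setFc_append {V : List (Int × Int)} {c : Int × Int} (hc : c ∈ gridL) (hcV : c ∉ V) :
    setFc (V ++ [c]) + 1 = setFc V := by
  unfold setFc
  exact countP_notmem_append (by decide) hc hcV

theorem setFc_disc (board : List (List String)) (x y : Int) :
    ∀ (cs : List (Int × Int)) (V : List (Int × Int)),
      setFc (V ++ disc board V x y cs) + (disc board V x y cs).length = setFc V := by
  intro cs
  induction cs with
  | nil => intro V; simp [disc]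
  | cons c cs ih =>
    intro V
    by_cases hg : goodB board V x y c = true
    · simp only [disc, if_pos hg]
      have hassoc : V ++ (c :: disc board (V ++ [c]) x y cs) = (V ++ [c]) ++ disc board (V ++ [c]) x y cs := by
        simp
      rw [hassoc]
      have h1 := ih (V ++ [c])
      have h2 := setFc_append (goodB_spec hg).1 (goodB_notmem hg)
      simp only [List.length_cons]
      omega
    · simp only [disc, if_neg hg]
      exact ih V

theorem disc_mem (board : List (List String)) (x y : Int) :
    ∀ (cs : List (Int × Int)) (V : List (Int × Int)) (c' : Int × Int),
      c' ∈ disc board V x y cs → c' ∈ gridL ∧ c' ∉ V := by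
  intro cs
  induction cs with
  | nil => intro V c' h; simp [disc] at h
  | cons c cs ih =>
    intro V c' h
    by_cases hg : goodB board V x y c = true
    · simp only [disc, if_pos hg, List.mem_cons] at h
      rcases h with rfl | h
      · exact ⟨(goodB_spec hg).1, goodB_notmem hg⟩
      · have := ih (V ++ [c]) c' h
        exact ⟨this.1, fun hv => this.2 (by simp [hv])⟩
    · simp only [disc, if_neg hg] at h
      exact ih V c' h

theorem absRun_nil_nil (board : List (List String)) (V : List (Int × Int)) (dd : Int) :
    absRun board V [] [] dd = dd := by
  unfold absRun
  cases h : ([] : List (Int × Int)).length + ([] : List (Int × Int)).length + setFc V <;> simp [absF]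

theorem absRun_shift (board : List (List String)) (V l2 : List (Int × Int)) (dd : Int)
    (h : l2 ≠ []) : absRun board V [] l2 dd = absRun board V l2 [] (dd + 1) := by
  obtain ⟨c, l2', rfl⟩ := List.exists_cons_of_ne_nil h
  unfold absRun
  simp only [List.length_nil, List.length_cons]
  have hF : 0 + (l2'.length + 1) + setFc V = (l2'.length + setFc V) + 1 := by omega
  rw [hF]
  rw [show absF board ((l2'.length + setFc V) + 1) V [] (c :: l2') dd
      = absF board ((l2'.length + setFc V) + 1) V (c :: l2') [] (dd + 1) from by rw [absF]]
  congr 1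
  omega

theorem absRun_cons (board : List (List String)) (V l1 l2 : List (Int × Int)) (x y : Int) (dd : Int) :
    absRun board V ((x, y) :: l1) l2 dd
      = absRun board (V ++ discover board V x y) l1 (l2 ++ discover board V x y) dd := by
  unfold absRun
  simp only [List.length_cons, List.length_append]
  have hF : l1.length + 1 + l2.length + setFc V = (l1.length + l2.length + setFc V) + 1 := by omega
  rw [hF]
  rw [show absF board ((l1.length + l2.length + setFc V) + 1) V ((x, y) :: l1) l2 dd
      = absF board (l1.length + l2.length + setFc V) (V ++ discover board V x y) l1 (l2 ++ discover board V x y) dd from by rw [absF]]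
  congr 1
  have := setFc_disc board x y (candList x y) V
  unfold discover
  omega


theorem foldBcell (board : List (List String)) (x y : Int) :
    ∀ (cs : List (Int × Int)) (W acc : List (Int × Int)),
      List.foldl (stepB board x y) (W, acc) cs
        = (W ++ disc board W x y cs, acc ++ disc board W x y cs) := by
  intro cs
  induction cs with
  | nil => intro W acc; simp [disc]
  | cons c cs ih =>
    intro W acc
    simp only [List.foldl_cons]
    by_cases hg : goodB board W x y c = true
    · have hcm : c ∉ W := goodB_notmem hg
      have hstep : stepB board x y (W, acc) c = (W ++ [c], acc ++ [c]) := by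
        simp [stepB, hg, PySem.Set.add, hcm]
      rw [hstep, ih]
      simp [disc, hg]
    · have hstep : stepB board x y (W, acc) c = (W, acc) := by
        simp [stepB, hg]
      rw [hstep, ih]
      simp [disc, hg]

theorem levelB_fold (board : List (List String)) :
    ∀ (F : List (Int × Int)) (V acc : List (Int × Int)),
      ∃ N, List.foldl (fun st p => (candList p.1 p.2).foldl (stepB board p.1 p.2) st) (V, acc) F
            = (V ++ N, acc ++ N) ∧ setFc (V ++ N) + N.length = setFc V := by
  intro F
  induction F with
  | nil => intro V acc; exact ⟨[], by simp⟩
  | cons p F ih =>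
    intro V acc
    obtain ⟨px, py⟩ := p
    simp only [List.foldl_cons]
    rw [foldBcell]
    obtain ⟨N', h1, h2⟩ := ih (V ++ disc board V px py (candList px py)) (acc ++ disc board V px py (candList px py))
    refine ⟨disc board V px py (candList px py) ++ N', ?_, ?_⟩
    · rw [h1]; simp
    · have h3 := setFc_disc board px py (candList px py) V
      rw [← List.append_assoc]
      simp only [List.length_append] at *
      omega

theorem Mlem (board : List (List String)) :
    ∀ (F V acc : List (Int × Int)) (dd : Int),
      absRun board V F acc dd
        = (let st := List.foldl (fun st p => (candList p.1 p.2).foldl (stepB board p.1 p.2) st) (V, acc) F;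
           if st.2 = [] then dd else absRun board st.1 st.2 [] (dd + 1)) := by
  intro F
  induction F with
  | nil =>
    intro V acc dd
    simp only [List.foldl_nil]
    by_cases h : acc = []
    · subst h; simp [absRun_nil_nil]
    · simp [h, absRun_shift board V acc dd h]
  | cons p F ih =>
    intro V acc dd
    obtain ⟨px, py⟩ := p
    simp only [List.foldl_cons]
    rw [foldBcell]
    rw [absRun_cons]
    exact ih (V ++ discover board V px py) (acc ++ discover board V px py) dd

theorem BloopF_nil (board : List (List String)) (f : Nat) (W : List (Int × Int)) (dep : Int) :
    BloopF board f W [] dep = dep := by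
  cases f <;> simp [BloopF]

theorem LB (board : List (List String)) :
    ∀ (fb : Nat) (V F : List (Int × Int)) (dep : Int), F ≠ [] → setFc V < fb →
      BloopF board fb V F dep = absRun board V F [] (dep + 1) := by
  intro fb
  induction fb with
  | zero => intro V F dep _ h; omega
  | succ fb ih =>
    intro V F dep hF hfc
    obtain ⟨c, F', rfl⟩ := List.exists_cons_of_ne_nil hF
    obtain ⟨N, h1, h2⟩ := levelB_fold board (c :: F') V []
    have hM := Mlem board (c :: F') V [] (dep + 1)
    simp only [h1, List.nil_append] at hM
    rw [show BloopF board (fb + 1) V (c :: F') dep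
        = BloopF board fb (levelB board V (c :: F')).1 (levelB board V (c :: F')).2 (dep + 1) from by rw [BloopF]]
    unfold levelB
    rw [h1]
    by_cases hN : N = []
    · subst hN
      simp only [List.append_nil]
      rw [BloopF_nil]
      rw [hM]
      simp
    · rw [hM, if_neg hN]
      exact ih (V ++ N) N (dep + 1) hN (by
        have : 1 ≤ N.length := by
          cases N with | nil => exact absurd rfl hN | cons a b => simp
        omega)


theorem shape5_mset {α : Type} {m : List (List α)} (hm : shape5 m) {x y : Int}
    (hx : 0 ≤ x) (hx5 : x < 5) (hy : 0 ≤ y) (v : α) : shape5 (mset m x y v) := by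
  obtain ⟨hl, hr⟩ := hm
  unfold mset
  rw [PySem.List.pySetD_of_nonneg _ _ hx]
  constructor
  · simpa using hl
  · intro r hrm
    rcases List.mem_or_eq_of_mem_set hrm with h | h
    · exact hr r h
    · subst h
      rw [PySem.List.pyGetD_eq_getElem m [] hx (by omega)]
      rw [PySem.List.pySetD_of_nonneg _ _ hy]
      rw [List.length_set]
      exact hr _ (List.getElem_mem _)

theorem mgetD_mset_self {α : Type} {m : List (List α)} (hm : shape5 m) {x y : Int}
    (hx : 0 ≤ x) (hx5 : x < 5) (hy : 0 ≤ y) (hy5 : y < 5) (v d : α) :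
    mgetD (mset m x y v) x y d = v := by
  obtain ⟨hl, hr⟩ := hm
  have hxl : x.toNat < m.length := by omega
  have hrow : m[x.toNat].length = 5 := hr _ (List.getElem_mem _)
  unfold mset mgetD
  rw [PySem.List.pyGetD_eq_getElem m [] hx (by omega)]
  rw [PySem.List.pySetD_of_nonneg _ v hy]
  rw [PySem.List.pySetD_of_nonneg m _ hx]
  rw [PySem.List.pyGetD_eq_getElem _ [] hx (by simp only [List.length_set]; omega)]
  rw [List.getElem_set_self (by simp only [List.length_set]; omega)]
  rw [PySem.List.pyGetD_eq_getElem _ d hy (by simp only [List.length_set]; omega)]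
  rw [List.getElem_set_self (by simp only [List.length_set]; omega)]

theorem mgetD_mset_ne {α : Type} {m : List (List α)} (hm : shape5 m) {x y a b : Int}
    (hx : 0 ≤ x) (hx5 : x < 5) (hy : 0 ≤ y) (hy5 : y < 5)
    (ha : 0 ≤ a) (ha5 : a < 5) (hb : 0 ≤ b) (hb5 : b < 5)
    (hne : (a, b) ≠ (x, y)) (v d : α) :
    mgetD (mset m x y v) a b d = mgetD m a b d := by
  obtain ⟨hl, hr⟩ := hm
  have hxl : x.toNat < m.length := by omega
  have hal : a.toNat < m.length := by omega
  have hrowx : m[x.toNat].length = 5 := hr _ (List.getElem_mem _)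
  have hrowa : m[a.toNat].length = 5 := hr _ (List.getElem_mem _)
  unfold mset mgetD
  rw [PySem.List.pyGetD_eq_getElem m [] hx (by omega)]
  rw [PySem.List.pySetD_of_nonneg _ v hy]
  rw [PySem.List.pySetD_of_nonneg m _ hx]
  rw [PySem.List.pyGetD_eq_getElem _ [] ha (by simp only [List.length_set]; omega)]
  rw [PySem.List.pyGetD_eq_getElem m [] (i := a) ha (by omega)]
  by_cases hax : a = x
  · subst hax
    have hby : b ≠ y := fun hh => hne (by rw [hh])
    rw [show ((m.set a.toNat (m[a.toNat].set y.toNat v))[a.toNat]'(by simp only [List.length_set]; omega))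
        = m[a.toNat].set y.toNat v from List.getElem_set_self _]
    rw [PySem.List.pyGetD_eq_getElem _ d hb (by simp only [List.length_set]; omega)]
    rw [PySem.List.pyGetD_eq_getElem _ d hb (by omega)]
    exact List.getElem_set_ne (by omega) _
  · rw [show ((m.set x.toNat (m[x.toNat].set y.toNat v))[a.toNat]'(by simp only [List.length_set]; omega))
        = m[a.toNat] from List.getElem_set_ne (by omega) _]


def agreeV (visit : List (List Bool)) (V : List (Int × Int)) : Prop :=
  ∀ c ∈ gridL, (mgetD visit c.1 c.2 true = true ↔ c ∈ V)

def candOf (x y k : Int) : Int × Int :=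
  (x + PySem.List.pyGetD dxA k 0, y + PySem.List.pyGetD dyA k 0)

theorem candOf_fst (x y k : Int) : (candOf x y k).1 = x + PySem.List.pyGetD dxA k 0 := rfl
theorem candOf_snd (x y k : Int) : (candOf x y k).2 = y + PySem.List.pyGetD dyA k 0 := rfl

theorem mem_gridL' (c : Int × Int) : c ∈ gridL ↔ 0 ≤ c.1 ∧ c.1 < 5 ∧ 0 ≤ c.2 ∧ c.2 < 5 := by
  obtain ⟨a, b⟩ := c
  exact mem_gridL a b

theorem cand_map (x y : Int) :
    (PySem.List.pyRange 0 4 1).map (candOf x y) = candList x y := by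
  have h4 : PySem.List.pyRange 0 4 1 = [0, 1, 2, 3] := by decide
  have e0 : PySem.List.pyGetD dxA 0 0 = 0 := by decide
  have e1 : PySem.List.pyGetD dxA 1 0 = 0 := by decide
  have e2 : PySem.List.pyGetD dxA 2 0 = 1 := by decide
  have e3 : PySem.List.pyGetD dxA 3 0 = -1 := by decide
  have f0 : PySem.List.pyGetD dyA 0 0 = 1 := by decide
  have f1 : PySem.List.pyGetD dyA 1 0 = -1 := by decide
  have f2 : PySem.List.pyGetD dyA 2 0 = 0 := by decide
  have f3 : PySem.List.pyGetD dyA 3 0 = 0 := by decide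
  rw [h4]
  simp only [List.map_cons, List.map_nil, candOf, e0, e1, e2, e3, f0, f1, f2, f3, candList]
  norm_num
  constructor <;> omega

theorem foldA_disc (board : List (List String)) (x y : Int) (dd : Int) :
    ∀ (ks : List Int) (V Q : List (Int × Int)) (visit : List (List Bool)) (dist : List (List Int)),
      shape5 visit → shape5 dist → agreeV visit V → (x, y) ∈ gridL → (x, y) ∈ V →
      mgetD dist x y 0 = dd →
      ∃ visit' dist',
        List.foldl (stepA board x y) (Q, visit, dist) ks
            = (Q ++ disc board V x y (ks.map (candOf x y)), visit', dist')
        ∧ shape5 visit' ∧ shape5 dist'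
        ∧ agreeV visit' (V ++ disc board V x y (ks.map (candOf x y)))
        ∧ ∀ c ∈ gridL, mgetD dist' c.1 c.2 0
            = if c ∈ disc board V x y (ks.map (candOf x y)) then dd + 1 else mgetD dist c.1 c.2 0 := by
  intro ks
  induction ks with
  | nil =>
    intro V Q visit dist hsv hsd hag hxyg hxyV hdxy
    exact ⟨visit, dist, by simp [disc], hsv, hsd, by simpa [disc] using hag,
      by intro c hc; simp [disc]⟩
  | cons k ks ih =>
    intro V Q visit dist hsv hsd hag hxyg hxyV hdxy
    have hxb := (mem_gridL' _).mp hxyg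
    simp only [List.map_cons, List.foldl_cons]
    by_cases hr : 0 ≤ x + PySem.List.pyGetD dxA k 0 ∧ x + PySem.List.pyGetD dxA k 0 < 5
        ∧ 0 ≤ y + PySem.List.pyGetD dyA k 0 ∧ y + PySem.List.pyGetD dyA k 0 < 5
    · have hcg : candOf x y k ∈ gridL := (mem_gridL' _).mpr hr
      by_cases hvl : mgetD visit (x + PySem.List.pyGetD dxA k 0) (y + PySem.List.pyGetD dyA k 0) true = false
          ∧ boardAt board x y < boardAt board (x + PySem.List.pyGetD dxA k 0) (y + PySem.List.pyGetD dyA k 0)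
      · -- discovery step
        have hcV : candOf x y k ∉ V := by
          intro hmem
          have := (hag _ hcg).mpr hmem
          rw [candOf_fst, candOf_snd] at this
          rw [hvl.1] at this
          cases this
        have hg : goodB board V x y (candOf x y k) = true := by
          unfold goodB
          simp only [Bool.and_eq_true, Bool.not_eq_true', decide_eq_true_eq]
          refine ⟨⟨hr, ?_⟩, hvl.2⟩
          by_contra hh
          exact hcV (contains_iff_memP.mp (by revert hh; cases (V.contains (candOf x y k)) <;> simp))
        have hxyne : (x, y) ≠ candOf x y k := by
          intro hh
          exact hcV (hh ▸ hxyV)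
        have hstep : stepA board x y (Q, visit, dist) k
            = (Q ++ [candOf x y k],
               mset visit (x + PySem.List.pyGetD dxA k 0) (y + PySem.List.pyGetD dyA k 0) true,
               mset dist (x + PySem.List.pyGetD dxA k 0) (y + PySem.List.pyGetD dyA k 0) (dd + 1)) := by
          simp only [stepA]
          rw [if_pos hr, if_pos hvl, hdxy]
          rfl
        rw [hstep]
        have hsv' : shape5 (mset visit (x + PySem.List.pyGetD dxA k 0) (y + PySem.List.pyGetD dyA k 0) true) :=
          shape5_mset hsv hr.1 hr.2.1 hr.2.2.1 true
        have hsd' : shape5 (mset dist (x + PySem.List.pyGetD dxA k 0) (y + PySem.List.pyGetD dyA k 0) (dd + 1)) :=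
          shape5_mset hsd hr.1 hr.2.1 hr.2.2.1 (dd + 1)
        have hag' : agreeV (mset visit (x + PySem.List.pyGetD dxA k 0) (y + PySem.List.pyGetD dyA k 0) true)
            (V ++ [candOf x y k]) := by
          intro c hc
          have hcb := (mem_gridL' _).mp hc
          by_cases hcc : c = candOf x y k
          · have h1 : c.1 = x + PySem.List.pyGetD dxA k 0 := by rw [hcc]; rfl
            have h2 : c.2 = y + PySem.List.pyGetD dyA k 0 := by rw [hcc]; rfl
            rw [h1, h2]
            rw [mgetD_mset_self hsv hr.1 hr.2.1 hr.2.2.1 hr.2.2.2 true true]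
            simp [hcc]
          · have hne : (c.1, c.2) ≠ (x + PySem.List.pyGetD dxA k 0, y + PySem.List.pyGetD dyA k 0) := by
              rw [Prod.mk.eta]; exact hcc
            rw [mgetD_mset_ne hsv hr.1 hr.2.1 hr.2.2.1 hr.2.2.2 hcb.1 hcb.2.1 hcb.2.2.1 hcb.2.2.2 hne true true]
            rw [hag c hc]
            simp [hcc]
        have hdxy' : mgetD (mset dist (x + PySem.List.pyGetD dxA k 0) (y + PySem.List.pyGetD dyA k 0) (dd + 1)) x y 0 = dd := by
          have hne : ((x, y).1, (x, y).2) ≠ (x + PySem.List.pyGetD dxA k 0, y + PySem.List.pyGetD dyA k 0) := by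
            rw [Prod.mk.eta]; exact hxyne
          rw [mgetD_mset_ne hsd hr.1 hr.2.1 hr.2.2.1 hr.2.2.2 hxb.1 hxb.2.1 hxb.2.2.1 hxb.2.2.2 hne (dd + 1) 0]
          exact hdxy
        obtain ⟨visit', dist', heq, h1, h2, hagr, hpt⟩ :=
          ih (V ++ [candOf x y k]) (Q ++ [candOf x y k]) _ _ hsv' hsd' hag' hxyg (by simp [hxyV]) hdxy'
        refine ⟨visit', dist', ?_, h1, h2, ?_, ?_⟩
        · rw [heq]
          simp only [disc, hg, if_true]
          rw [← List.append_cons]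
        · simp only [disc, hg, if_true]
          rw [← List.append_cons] at hagr
          exact hagr
        · intro c hc
          have hcb := (mem_gridL' _).mp hc
          have hh := hpt c hc
          simp only [disc, hg, if_true]
          by_cases hcc : c = candOf x y k
          · rw [hh]
            by_cases hin : c ∈ disc board (V ++ [candOf x y k]) x y (List.map (candOf x y) ks)
            · simp [List.mem_cons, hin]
            · rw [if_neg hin]
              have h1 : c.1 = x + PySem.List.pyGetD dxA k 0 := by rw [hcc]; rfl
              have h2 : c.2 = y + PySem.List.pyGetD dyA k 0 := by rw [hcc]; rfl
              rw [h1, h2]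
              rw [mgetD_mset_self hsd hr.1 hr.2.1 hr.2.2.1 hr.2.2.2 (dd + 1) 0]
              simp [List.mem_cons, hcc]
          · rw [hh]
            have hne : (c.1, c.2) ≠ (x + PySem.List.pyGetD dxA k 0, y + PySem.List.pyGetD dyA k 0) := by
              rw [Prod.mk.eta]; exact hcc
            rw [mgetD_mset_ne hsd hr.1 hr.2.1 hr.2.2.1 hr.2.2.2 hcb.1 hcb.2.1 hcb.2.2.1 hcb.2.2.2 hne (dd + 1) 0]
            simp [List.mem_cons, hcc]
      · -- no discovery: already visited, or the letter is not larger
        have hg : goodB board V x y (candOf x y k) = false := by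
          unfold goodB
          by_contra hh
          simp only [Bool.not_eq_false, Bool.and_eq_true, Bool.not_eq_true', decide_eq_true_eq] at hh
          obtain ⟨⟨-, hcv⟩, hlt⟩ := hh
          have hnotV : candOf x y k ∉ V := by
            intro hmem
            rw [contains_iff_memP.mpr hmem] at hcv
            cases hcv
          have hvis : mgetD visit (x + PySem.List.pyGetD dxA k 0) (y + PySem.List.pyGetD dyA k 0) true = false := by
            have hiff := hag _ hcg
            rw [candOf_fst, candOf_snd] at hiff
            cases hmv : mgetD visit (x + PySem.List.pyGetD dxA k 0) (y + PySem.List.pyGetD dyA k 0) true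
            · rfl
            · exact absurd (hiff.mp hmv) hnotV
          refine hvl ⟨hvis, ?_⟩
          rw [candOf_fst, candOf_snd] at hlt
          exact hlt
        have hstep : stepA board x y (Q, visit, dist) k = (Q, visit, dist) := by
          simp only [stepA]
          rw [if_pos hr, if_neg hvl]
        rw [hstep]
        obtain ⟨visit', dist', heq, h1, h2, hagr, hpt⟩ :=
          ih V Q visit dist hsv hsd hag hxyg hxyV hdxy
        refine ⟨visit', dist', ?_, h1, h2, ?_, ?_⟩ <;> simp only [disc, hg, Bool.false_eq_true, if_false]
        · exact heq
        · exact hagr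
        · exact hpt
    · have hg : goodB board V x y (candOf x y k) = false := by
        unfold goodB
        by_contra hh
        simp only [Bool.not_eq_false, Bool.and_eq_true, decide_eq_true_eq] at hh
        exact hr hh.1.1
      have hstep : stepA board x y (Q, visit, dist) k = (Q, visit, dist) := by
        simp only [stepA]
        rw [if_neg hr]
      rw [hstep]
      obtain ⟨visit', dist', heq, h1, h2, hagr, hpt⟩ :=
        ih V Q visit dist hsv hsd hag hxyg hxyV hdxy
      refine ⟨visit', dist', ?_, h1, h2, ?_, ?_⟩ <;> simp only [disc, hg, Bool.false_eq_true, if_false]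
      · exact heq
      · exact hagr
      · exact hpt


theorem AloopF_nil (board : List (List String)) (f : Nat) (visit : List (List Bool))
    (dist : List (List Int)) : AloopF board f [] visit dist = dist := by
  cases f <;> simp [AloopF]

theorem flatten_to_grid {dist : List (List Int)} (hs : shape5 dist) :
    ∀ e ∈ dist.flatten, ∃ c ∈ gridL, mgetD dist c.1 c.2 0 = e := by
  obtain ⟨hl, hr⟩ := hs
  intro e he
  obtain ⟨row, hrow, herow⟩ := List.mem_flatten.mp he
  obtain ⟨i, hi, rfl⟩ := List.mem_iff_getElem.mp hrow
  obtain ⟨j, hj, rfl⟩ := List.mem_iff_getElem.mp herow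
  refine ⟨((i : Int), (j : Int)), ?_, ?_⟩
  · rw [mem_gridL]
    have : (dist[i]).length = 5 := hr _ (List.getElem_mem _)
    omega
  · have hrowlen : (dist[i]).length = 5 := hr _ (List.getElem_mem _)
    unfold mgetD
    rw [PySem.List.pyGetD_eq_getElem dist [] (by positivity) (by push_cast; omega)]
    rw [PySem.List.pyGetD_eq_getElem _ 0 (by positivity) (by push_cast; simp; omega)]
    simp

theorem grid_to_flatten {dist : List (List Int)} (hs : shape5 dist) :
    ∀ c ∈ gridL, mgetD dist c.1 c.2 0 ∈ dist.flatten := by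
  obtain ⟨hl, hr⟩ := hs
  intro c hc
  have hcb := (mem_gridL' c).mp hc
  have h1 : c.1.toNat < dist.length := by omega
  have hrowlen : (dist[c.1.toNat]).length = 5 := hr _ (List.getElem_mem _)
  unfold mgetD
  rw [PySem.List.pyGetD_eq_getElem dist [] hcb.1 (by omega)]
  rw [PySem.List.pyGetD_eq_getElem _ 0 hcb.2.2.1 (by omega)]
  exact List.mem_flatten.mpr ⟨_, List.getElem_mem _, List.getElem_mem _⟩

theorem maxScan_spec {dist : List (List Int)} (hs : shape5 dist) {D : Int}
    (hb : ∀ c ∈ gridL, mgetD dist c.1 c.2 0 ≤ D)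
    (hex : ∃ c ∈ gridL, mgetD dist c.1 c.2 0 = D) (hD : 0 ≤ D) : maxScan dist = D := by
  have hstep : (fun (a j : Int) => if a < j then j else a) = max := by
    funext a j
    rw [max_def]
    split_ifs <;> omega
  unfold maxScan
  rw [← List.foldl_flatten, hstep]
  have hup : dist.flatten.foldl max 0 ≤ D := by
    rcases PySem.List.foldl_max_mem dist.flatten 0 with h | h
    · omega
    · obtain ⟨c, hcg, hceq⟩ := flatten_to_grid hs _ h
      have := hb c hcg
      omega
  have hlo : D ≤ dist.flatten.foldl max 0 := by
    obtain ⟨c, hcg, hceq⟩ := hex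
    have := grid_to_flatten hs c hcg
    rw [hceq] at this
    exact (PySem.List.le_foldl_max dist.flatten 0).2 D this
  omega

theorem LA (board : List (List String)) :
    ∀ (n : Nat) (V l1 l2 : List (Int × Int)) (visit : List (List Bool)) (dist : List (List Int))
      (dd : Int) (f : Nat),
      2 * setFc V + l1.length + 2 * l2.length ≤ n →
      shape5 visit → shape5 dist → agreeV visit V →
      (∀ c ∈ l1, c ∈ gridL ∧ c ∈ V ∧ mgetD dist c.1 c.2 0 = dd) →
      (∀ c ∈ l2, c ∈ gridL ∧ c ∈ V ∧ mgetD dist c.1 c.2 0 = dd + 1) →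
      (∀ c ∈ gridL, mgetD dist c.1 c.2 0 ≤ (if l2 = [] then dd else dd + 1)) →
      (∃ c ∈ gridL, mgetD dist c.1 c.2 0 = (if l2 = [] then dd else dd + 1)) →
      1 ≤ dd →
      l1.length + l2.length + setFc V ≤ f →
      maxScan (AloopF board f (l1 ++ l2) visit dist) = absRun board V l1 l2 dd := by
  intro n
  induction n with
  | zero =>
    intro V l1 l2 visit dist dd f hn hsv hsd hag hl1 hl2 hbound hex hd hf
    have h1 : l1 = [] := List.length_eq_zero_iff.mp (by omega)
    have h2 : l2 = [] := List.length_eq_zero_iff.mp (by omega)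
    subst h1; subst h2
    rw [show ([] ++ [] : List (Int × Int)) = [] from rfl, AloopF_nil, absRun_nil_nil]
    exact maxScan_spec hsd (by simpa using hbound) (by simpa using hex) (by omega)
  | succ n ih =>
    intro V l1 l2 visit dist dd f hn hsv hsd hag hl1 hl2 hbound hex hd hf
    rcases l1 with _ | ⟨⟨x, y⟩, l1'⟩
    · rcases l2 with _ | ⟨c2, l2'⟩
      · rw [show ([] ++ [] : List (Int × Int)) = [] from rfl, AloopF_nil, absRun_nil_nil]
        exact maxScan_spec hsd (by simpa using hbound) (by simpa using hex) (by omega)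
      · rw [show ([] ++ (c2 :: l2') : List (Int × Int)) = (c2 :: l2') ++ [] from by simp]
        rw [ih V (c2 :: l2') [] visit dist (dd + 1) f
          (by simp only [List.length_cons, List.length_nil] at hn ⊢; omega)
          hsv hsd hag hl2 (by intro c hc; cases hc)
          (by simpa using hbound) (by simpa using hex) (by omega)
          (by simp only [List.length_cons, List.length_nil] at hf ⊢; omega)]
        rw [absRun_shift board V (c2 :: l2') dd (List.cons_ne_nil c2 l2')]
    · rcases f with _ | f'
      · simp only [List.length_cons] at hf; omega
      · obtain ⟨hxyg, hxyV, hdxy⟩ := hl1 (x, y) List.mem_cons_self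
        obtain ⟨visit', dist', heq, hsv', hsd', hagr, hpt⟩ :=
          foldA_disc board x y dd (PySem.List.pyRange 0 4 1) V (l1' ++ l2) visit dist
            hsv hsd hag hxyg hxyV hdxy
        rw [cand_map x y] at heq hagr hpt
        rw [show disc board V x y (candList x y) = discover board V x y from rfl] at heq hagr hpt
        have hnwmem := fun c hc => disc_mem board x y (candList x y) V c hc
        have hfc := setFc_disc board x y (candList x y) V
        rw [show disc board V x y (candList x y) = discover board V x y from rfl] at hfc
        simp only [List.cons_append]
        rw [show AloopF board (f' + 1) ((x, y) :: (l1' ++ l2)) visit dist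
            = (AloopF board f'
                (List.foldl (stepA board x y) (l1' ++ l2, visit, dist) (PySem.List.pyRange 0 4 1)).1
                (List.foldl (stepA board x y) (l1' ++ l2, visit, dist) (PySem.List.pyRange 0 4 1)).2.1
                (List.foldl (stepA board x y) (l1' ++ l2, visit, dist) (PySem.List.pyRange 0 4 1)).2.2)
          from by rw [AloopF]]
        rw [heq]
        simp only []
        rw [List.append_assoc]
        have hnw : ∀ c ∈ discover board V x y, c ∈ gridL ∧ c ∉ V := by
          intro c hc
          exact hnwmem c (by simpa [discover] using hc)
        rw [ih (V ++ discover board V x y) l1' (l2 ++ discover board V x y) visit' dist' dd f'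
          (by simp only [List.length_cons, List.length_append] at hn ⊢; omega)
          hsv' hsd' hagr
          (by
            intro c hc
            obtain ⟨hg, hv, hval⟩ := hl1 c (List.mem_cons_of_mem _ hc)
            have hcn : c ∉ discover board V x y := fun hcd => (hnw c hcd).2 hv
            refine ⟨hg, List.mem_append_left _ hv, ?_⟩
            rw [hpt c hg, if_neg hcn, hval])
          (by
            intro c hc
            rcases List.mem_append.mp hc with hc2 | hcd
            · obtain ⟨hg, hv, hval⟩ := hl2 c hc2
              have hcn : c ∉ discover board V x y := fun hcd => (hnw c hcd).2 hv
              refine ⟨hg, List.mem_append_left _ hv, ?_⟩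
              rw [hpt c hg, if_neg hcn, hval]
            · refine ⟨(hnw c hcd).1, List.mem_append_right _ hcd, ?_⟩
              rw [hpt c (hnw c hcd).1, if_pos hcd])
          (by
            intro c hc
            rw [hpt c hc]
            by_cases hcd : c ∈ discover board V x y
            · rw [if_pos hcd]
              have hne : l2 ++ discover board V x y ≠ [] := by
                intro hnil
                rw [List.append_eq_nil_iff] at hnil
                rw [hnil.2] at hcd
                cases hcd
              rw [if_neg hne]
            · rw [if_neg hcd]
              have hb := hbound c hc
              by_cases h2 : l2 = []
              · by_cases hdn : discover board V x y = []
                · simp only [h2, hdn, List.append_nil] at *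
                  exact hb
                · rw [if_pos h2] at hb
                  rw [if_neg (by simp [h2, hdn])]
                  omega
              · rw [if_neg h2] at hb
                rw [if_neg (by simp [h2])]
                exact hb)
          (by
            rcases hdn : discover board V x y with _ | ⟨c0, nw'⟩
            · obtain ⟨c0, hc0, hval⟩ := hex
              refine ⟨c0, hc0, ?_⟩
              rw [hpt c0 hc0, hdn]
              simp only [List.not_mem_nil, if_false, List.append_nil]
              exact hval
            · refine ⟨c0, ((hnw c0 (by rw [hdn]; exact List.mem_cons_self)).1), ?_⟩
              rw [hpt c0 ((hnw c0 (by rw [hdn]; exact List.mem_cons_self)).1)]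
              rw [if_pos (by rw [hdn]; exact List.mem_cons_self)]
              rw [if_neg (by simp)])
          hd
          (by
            simp only [List.length_cons, List.length_append] at hf ⊢
            omega)]
        rw [absRun_cons]

theorem solution_spec : Claim_equal_solution := by
  intro board _ _
  unfold Spec_solution
  have hA := LA board 49 [((0 : Int), (0 : Int))] [((0 : Int), (0 : Int))] []
    (mset (List.replicate 5 (List.replicate 5 false)) 0 0 true)
    (mset (List.replicate 5 (List.replicate 5 (0 : Int))) 0 0 1) 1 26
    (by decide) (by unfold shape5; decide) (by unfold shape5; decide) (by unfold agreeV; decide)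
    (by decide) (by decide) (by decide) (by decide) (by decide) (by decide)
  have hB := LB board 26 [((0 : Int), (0 : Int))] [((0 : Int), (0 : Int))] 0
    (by simp) (by decide)
  simp only [List.append_nil] at hA
  show maxScan (AloopF board 26 [((0 : Int), (0 : Int))]
      (mset (List.replicate 5 (List.replicate 5 false)) 0 0 true)
      (mset (List.replicate 5 (List.replicate 5 (0 : Int))) 0 0 1))
    = BloopF board 26 (PySem.Set.ofList [((0 : Int), (0 : Int))]) [((0 : Int), (0 : Int))] 0
  rw [show PySem.Set.ofList [((0 : Int), (0 : Int))] = [((0 : Int), (0 : Int))] from by decide]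
  rw [hA, hB]
  norm_num
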